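-- pv_equiv track=rewrite | github.com/awarebayes/kg | 2/shapes.py | find_intersection_bounds
-- ===== SOURCE A (Python) =====
-- def find_intersection_bounds(mask, points):
--     last_point = mask[0]
--     intersection_bounds = []
--     for i in range(len(mask)):
--         if mask[i] != last_point:
--             intersection_bounds.append((points[i-1], points[i]))
--         last_point = mask[i]
--     return intersection_bounds
-- ===== SOURCE B (Python) =====
-- def _run_lengths(mask):
--     """Run-length encode mask into a list of (value, run_length) pairs."""
--     runs = []
--     for v in mask:
--         if runs and runs[-1][0] == v:
--             runs[-1] = (v, runs[-1][1] + 1)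
--         else:
--             runs.append((v, 1))
--     return runs
--
--
-- def find_intersection_bounds(mask, points):
--     # Stage 1: run-length encode the mask; stage 2: every run after the first
--     # starts at a transition, at cumulative index i -> pair (points[i-1], points[i]).
--     bounds = []
--     i = 0
--     for _, length in _run_lengths(mask):
--         if i:
--             bounds.append((points[i - 1], points[i]))
--         i += length
--     return bounds
-- ===== Notes on version B (the rewrite author's own statement) =====
-- stated objective: alternative
-- what changed: Instead of A's single pass comparing each mask element with the previous one, B first run-length encodes the mask and then emits one (points[i-1], points[i]) pair per run boundary, computing the boundary index as the cumulative run length.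
import Mathlib
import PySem

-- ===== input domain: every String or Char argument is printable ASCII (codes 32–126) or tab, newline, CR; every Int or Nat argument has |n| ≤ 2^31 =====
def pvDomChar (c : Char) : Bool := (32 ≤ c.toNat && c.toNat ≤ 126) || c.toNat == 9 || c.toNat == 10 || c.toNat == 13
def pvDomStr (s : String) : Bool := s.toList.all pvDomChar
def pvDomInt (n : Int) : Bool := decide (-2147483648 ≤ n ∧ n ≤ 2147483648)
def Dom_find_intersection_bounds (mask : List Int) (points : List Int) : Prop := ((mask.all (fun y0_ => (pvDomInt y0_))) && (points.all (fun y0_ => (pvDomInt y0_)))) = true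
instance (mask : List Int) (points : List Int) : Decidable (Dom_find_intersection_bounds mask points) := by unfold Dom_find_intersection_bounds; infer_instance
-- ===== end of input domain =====

-- B replaces A's adjacent-comparison pass by two stages: run-length encode the mask,
-- then emit one pair per run boundary at the cumulative index (alternative; same cost;
-- return value only).

-- ===== PORT A =====
-- literal port of A: last_point = mask[0]; for i in range(len(mask)): compare, append, update
def find_intersection_bounds (mask : List Int) (points : List Int) : List (Int × Int) :=
  ((PySem.List.pyRange 0 (mask.length : Int) 1).foldl
    (fun (st : Int × List (Int × Int)) i =>
      let m := PySem.List.pyGetD mask i 0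
      (m,
        if m ≠ st.1 then
          st.2 ++ [(PySem.List.pyGetD points (i - 1) 0, PySem.List.pyGetD points i 0)]
        else st.2))
    (PySem.List.pyGetD mask 0 0, [])).2

-- ===== PORT B =====
-- port of B's helper _run_lengths: for v in mask: if runs and runs[-1][0] == v then
-- runs[-1] = (v, runs[-1][1] + 1) else runs.append((v, 1))
def pvRunStep (runs : List (Int × Int)) (v : Int) : List (Int × Int) :=
  match runs.getLast? with
  | some last => if last.1 == v then runs.dropLast ++ [(v, last.2 + 1)] else runs ++ [(v, 1)]
  | none => runs ++ [(v, 1)]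

def pvRunLengths (mask : List Int) : List (Int × Int) := mask.foldl pvRunStep []

-- port of B's main loop: i = 0; for _, length in _run_lengths(mask): if i: append pair; i += length
def find_intersection_bounds_alt (mask : List Int) (points : List Int) : List (Int × Int) :=
  ((pvRunLengths mask).foldl
    (fun (st : Int × List (Int × Int)) r =>
      (st.1 + r.2,
        if st.1 ≠ 0 then
          st.2 ++ [(PySem.List.pyGetD points (st.1 - 1) 0, PySem.List.pyGetD points st.1 0)]
        else st.2))
    (0, [])).2

-- ===== PRECONDITION & SPEC =====
-- Pre_ excludes exactly the inputs where the Python A raises IndexError: an empty mask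
-- (mask[0]) and masks with a value transition at an index i with i >= len(points) (points[i]).
def Pre_find_intersection_bounds (mask : List Int) (points : List Int) : Prop :=
  mask ≠ [] ∧ ∀ i ∈ List.range mask.length,
    0 < i → mask.getD i 0 ≠ mask.getD (i - 1) 0 → i < points.length
instance (mask : List Int) (points : List Int) : Decidable (Pre_find_intersection_bounds mask points) := by unfold Pre_find_intersection_bounds; infer_instance
def pvWitness_find_intersection_bounds : List Int × List Int := ([0, 1], [3, 4])

def Spec_find_intersection_bounds (mask : List Int) (points : List Int) (out : List (Int × Int)) : Prop := out = find_intersection_bounds_alt mask points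
instance (mask : List Int) (points : List Int) (out : List (Int × Int)) : Decidable (Spec_find_intersection_bounds mask points out) := by unfold Spec_find_intersection_bounds; infer_instance

-- ===== CLAIM (what is proved, stated in full; the proofs are below) =====
def Claim_equal_find_intersection_bounds : Prop := ∀ (mask : List Int) (points : List Int), Dom_find_intersection_bounds mask points → Pre_find_intersection_bounds mask points → Spec_find_intersection_bounds mask points (find_intersection_bounds mask points)

-- ===== LEMMAS AND PROOFS =====

-- common characterisation of A's pass: scan the rest of the mask with the previous value
-- and the absolute index k of the current element
def pvCore (points : List Int) : Int → List Int → Int → List (Int × Int)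
  | _, [], _ => []
  | prev, b :: t, k =>
    (if b ≠ prev then [(PySem.List.pyGetD points (k - 1) 0, PySem.List.pyGetD points k 0)] else [])
      ++ pvCore points b t (k + 1)

-- recursive form of the run-length encoding
def pvRle : List Int → List (Int × Int)
  | [] => []
  | v :: t => (v, 1 + ((t.takeWhile (· == v)).length : Int)) :: pvRle (t.dropWhile (· == v))
termination_by l => l.length
decreasing_by
  simp only [List.length_cons]
  exact Nat.lt_succ_of_le (List.length_dropWhile_le _ _)

-- recursive form of B's second pass
def pvG (points : List Int) : List (Int × Int) → Int → List (Int × Int)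
  | [], _ => []
  | r :: rs, i =>
    (if i ≠ 0 then [(PySem.List.pyGetD points (i - 1) 0, PySem.List.pyGetD points i 0)] else [])
      ++ pvG points rs (i + r.2)

theorem pvA_loop (points mask : List Int) (k : Nat) (prev : Int) (acc : List (Int × Int)) :
    ((PySem.List.pyRange (k : Int) (mask.length : Int) 1).foldl
      (fun (st : Int × List (Int × Int)) i =>
        let m := PySem.List.pyGetD mask i 0
        (m,
          if m ≠ st.1 then
            st.2 ++ [(PySem.List.pyGetD points (i - 1) 0, PySem.List.pyGetD points i 0)]
          else st.2))
      (prev, acc)).2 = acc ++ pvCore points prev (mask.drop k) (k : Int) := by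
  by_cases hk : k < mask.length
  · obtain ⟨b, t, hbt⟩ : ∃ b t, mask.drop k = b :: t := by
      cases h : mask.drop k with
      | nil => exact absurd (List.drop_eq_nil_iff.mp h) (by omega)
      | cons b t => exact ⟨b, t, rfl⟩
    have hb : mask[k]? = some b := by
      rw [show k = k + 0 by omega, ← List.getElem?_drop, hbt]; rfl
    have hm : PySem.List.pyGetD mask (k : Int) 0 = b := by
      rw [PySem.List.pyGetD_natCast, List.getD_eq_getElem?_getD, hb]; rfl
    have ht : mask.drop (k + 1) = t := by
      rw [← List.drop_drop, hbt]; simp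
    have hcast : ((k : Int) + 1) = ((k + 1 : Nat) : Int) := by push_cast; ring
    rw [PySem.List.pyRange_one_cons (by exact_mod_cast hk)]
    simp only [List.foldl_cons, hm]
    rw [hcast, pvA_loop points mask (k + 1) b _, ht, hbt]
    rw [show pvCore points prev (b :: t) (k : Int)
          = (if b ≠ prev then
              [(PySem.List.pyGetD points ((k : Int) - 1) 0, PySem.List.pyGetD points (k : Int) 0)]
            else []) ++ pvCore points b t ((k : Int) + 1) from rfl, hcast]
    by_cases h : b = prev
    · subst h; simp
    · simp [h, List.append_assoc]
  · have h1 : mask.drop k = [] := List.drop_eq_nil_iff.mpr (by omega)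
    have h2 : PySem.List.pyRange (k : Int) (mask.length : Int) 1 = [] := by
      simp [PySem.List.pyRange]; omega
    simp [h1, h2, pvCore]
termination_by mask.length - k

-- B's first pass equals the recursive run-length encoding
theorem pvRunStep_fold (rest : List Int) : ∀ (runs : List (Int × Int)) (v c : Int),
    rest.foldl pvRunStep (runs ++ [(v, c)])
      = runs ++ [(v, c + ((rest.takeWhile (· == v)).length : Int))]
          ++ pvRle (rest.dropWhile (· == v)) := by
  induction rest with
  | nil => intro runs v c; simp [pvRle]
  | cons b t ih =>
    intro runs v c
    by_cases hb : b = v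
    · subst hb
      have hstep : pvRunStep (runs ++ [(b, c)]) b = runs ++ [(b, c + 1)] := by
        simp [pvRunStep]
      rw [List.foldl_cons, hstep, ih]
      simp only [List.takeWhile_cons, List.dropWhile_cons, beq_self_eq_true, if_true]
      simp only [List.length_cons]
      have : c + 1 + ((t.takeWhile (· == b)).length : Int)
           = c + (((t.takeWhile (· == b)).length + 1 : Nat) : Int) := by push_cast; ring
      rw [this]
    · have hvb : v ≠ b := fun h => hb h.symm
      have hstep : pvRunStep (runs ++ [(v, c)]) b = (runs ++ [(v, c)]) ++ [(b, 1)] := by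
        simp [pvRunStep, hvb]
      rw [List.foldl_cons, hstep, ih]
      have hbv : (b == v) = false := by simp [hb]
      simp [hbv, pvRle]

theorem pvRunLengths_eq (mask : List Int) : pvRunLengths mask = pvRle mask := by
  cases mask with
  | nil => simp [pvRunLengths, pvRle]
  | cons v t =>
    have h0 : pvRunStep [] v = [] ++ [(v, 1)] := by simp [pvRunStep]
    unfold pvRunLengths
    rw [List.foldl_cons, h0, pvRunStep_fold]
    simp [pvRle]

-- B's second pass as a foldl equals its recursive form
theorem pvG_fold (points : List Int) (rs : List (Int × Int)) :
    ∀ (i : Int) (acc : List (Int × Int)),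
    (rs.foldl
      (fun (st : Int × List (Int × Int)) r =>
        (st.1 + r.2,
          if st.1 ≠ 0 then
            st.2 ++ [(PySem.List.pyGetD points (st.1 - 1) 0, PySem.List.pyGetD points st.1 0)]
          else st.2))
      (i, acc)).2 = acc ++ pvG points rs i := by
  induction rs with
  | nil => intro i acc; simp [pvG]
  | cons r rs ih =>
    intro i acc
    rw [List.foldl_cons, ih]
    by_cases h : i = 0
    · subst h; simp [pvG]
    · simp [pvG, h, List.append_assoc]

-- pvCore ignores a prefix run of elements equal to prev, advancing the index
theorem pvCore_skip (points : List Int) (pre : List Int) :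
    ∀ (suf : List Int) (v : Int) (k : Int), (∀ x ∈ pre, x = v) →
    pvCore points v (pre ++ suf) k = pvCore points v suf (k + (pre.length : Int)) := by
  induction pre with
  | nil => intro suf v k _; simp
  | cons a pre ih =>
    intro suf v k hall
    have ha : a = v := hall a (by simp)
    subst ha
    show (if a ≠ a then _ else []) ++ pvCore points a (pre ++ suf) (k + 1) = _
    rw [if_neg (by simp), List.nil_append, ih suf a (k + 1) (fun x hx => hall x (by simp [hx]))]
    congr 1
    simp only [List.length_cons]
    push_cast; ring

-- head of dropWhile fails the predicate
theorem pv_head_dropWhile {α : Type} (p : α → Bool) (l : List α) :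
    ∀ b ∈ (l.dropWhile p).head?, p b = false := by
  induction l with
  | nil => intro b hb; simp at hb
  | cons a t ih =>
    intro b hb
    rw [List.dropWhile_cons] at hb
    by_cases h : p a
    · rw [if_pos h] at hb; exact ih b hb
    · rw [if_neg h] at hb
      simp only [List.head?_cons, Option.mem_def, Option.some.injEq] at hb
      subst hb
      simp [h]

-- main bridge: B's run scan equals A's adjacent scan, for a positive start index whose
-- first element (if any) differs from the previous value
theorem pvMain (points : List Int) (d : List Int) (v : Int) (j : Int)
    (hj : 0 < j) (hh : ∀ b ∈ d.head?, b ≠ v) :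
    pvG points (pvRle d) j = pvCore points v d j := by
  cases hd : d with
  | nil => simp [pvRle, pvG, pvCore]
  | cons b t =>
    have hbv : b ≠ v := hh b (by simp [hd])
    have htw : ∀ x ∈ t.takeWhile (· == b), x = b := by
      intro x hx
      have := List.mem_takeWhile_imp hx
      simpa using this
    have hsplit : t = t.takeWhile (· == b) ++ t.dropWhile (· == b) :=
      (List.takeWhile_append_dropWhile).symm
    have hlen : (t.dropWhile (· == b)).length ≤ t.length := List.length_dropWhile_le _ _
    rw [show pvRle (b :: t)
          = (b, 1 + ((t.takeWhile (· == b)).length : Int)) :: pvRle (t.dropWhile (· == b)) from by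
        rw [pvRle]]
    rw [show pvG points ((b, 1 + ((t.takeWhile (· == b)).length : Int)) :: pvRle (t.dropWhile (· == b))) j
          = (if j ≠ 0 then [(PySem.List.pyGetD points (j - 1) 0, PySem.List.pyGetD points j 0)] else [])
            ++ pvG points (pvRle (t.dropWhile (· == b))) (j + (1 + ((t.takeWhile (· == b)).length : Int))) from rfl]
    rw [show pvCore points v (b :: t) j
          = (if b ≠ v then [(PySem.List.pyGetD points (j - 1) 0, PySem.List.pyGetD points j 0)] else [])
            ++ pvCore points b t (j + 1) from rfl]
    rw [if_pos hbv, if_pos (by omega)]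
    congr 1
    conv_rhs => rw [hsplit]
    rw [pvCore_skip points _ _ _ _ htw]
    rw [show j + (1 + ((t.takeWhile (· == b)).length : Int))
          = j + 1 + ((t.takeWhile (· == b)).length : Int) from by ring]
    exact pvMain points (t.dropWhile (· == b)) b (j + 1 + ((t.takeWhile (· == b)).length : Int))
      (by positivity)
      (by intro x hx
          have := pv_head_dropWhile (· == b) t x hx
          simpa using this)
termination_by d.length
decreasing_by
  simp only [hd, List.length_cons]
  omega

theorem pv_main (mask points : List Int) :
    find_intersection_bounds mask points = find_intersection_bounds_alt mask points := by
  cases mask with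
  | nil => rfl
  | cons m0 rest =>
    unfold find_intersection_bounds find_intersection_bounds_alt
    rw [pvRunLengths_eq, pvG_fold]
    rw [PySem.List.pyRange_one_cons (by exact_mod_cast Nat.succ_pos rest.length)]
    simp only [List.foldl_cons]
    rw [PySem.List.pyGetD_zero_cons, if_neg (by simp)]
    rw [show ((0 : Int) + 1) = ((1 : Nat) : Int) by norm_num]
    rw [pvA_loop points (m0 :: rest) 1 m0 []]
    simp only [List.drop_one, List.tail_cons, List.nil_append]
    show pvCore points m0 rest ((1 : Nat) : Int)
        = pvG points (pvRle (m0 :: rest)) 0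
    rw [show pvRle (m0 :: rest)
          = (m0, 1 + ((rest.takeWhile (· == m0)).length : Int)) :: pvRle (rest.dropWhile (· == m0)) from by
        rw [pvRle]]
    rw [show pvG points ((m0, 1 + ((rest.takeWhile (· == m0)).length : Int)) :: pvRle (rest.dropWhile (· == m0))) 0
          = (if (0 : Int) ≠ 0 then [(PySem.List.pyGetD points (0 - 1) 0, PySem.List.pyGetD points 0 0)] else [])
            ++ pvG points (pvRle (rest.dropWhile (· == m0))) (0 + (1 + ((rest.takeWhile (· == m0)).length : Int))) from rfl]
    rw [if_neg (by simp), List.nil_append]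
    have htw : ∀ x ∈ rest.takeWhile (· == m0), x = m0 := by
      intro x hx
      have := List.mem_takeWhile_imp hx
      simpa using this
    conv_lhs => rw [(List.takeWhile_append_dropWhile (p := (· == m0)) (l := rest)).symm]
    rw [pvCore_skip points _ _ _ _ htw]
    rw [show (0 : Int) + (1 + ((rest.takeWhile (· == m0)).length : Int))
          = (((1 : Nat) : Int) + ((rest.takeWhile (· == m0)).length : Int)) from by push_cast; ring]
    exact (pvMain points (rest.dropWhile (· == m0)) m0
      (((1 : Nat) : Int) + ((rest.takeWhile (· == m0)).length : Int))
      (by positivity)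
      (by intro x hx
          have := pv_head_dropWhile (· == m0) rest x hx
          simpa using this)).symm

-- ===== VERDICT (by name: the statement is the Claim_ definition above) =====
theorem find_intersection_bounds_spec : Claim_equal_find_intersection_bounds := by
  intro mask points _ _
  exact pv_main mask points
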